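-- pv_equiv track=rewrite | github.com/nawue/CodeChallanges | KickStart/2020/Round-A/Workout.py | Solve
-- ===== SOURCE A (Python) =====
-- def Solve(N, K, M):
--     diff1 = 0
--     diffFinal = 0
--     if K==1 and len(M)==1:
--         return (M[0]+1) - M[0]
--     for x in range(K):
--         if len(M) == 1:
--             M.insert(1, int(M[-1]+1))
--         else:
--             for i in range(1, len(M)):
--                 diff1 = (M[i] - M[i-1])
--                 if (diff1 > diffFinal and diff1 > 1):
--                     diffFinal = diff1
--                     pos = i-1
--                 if (i==len(M)-1 and diffFinal==0):
--                     pos = len(M)-1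
--                     diffFinal=2
--             M.insert(pos+1, int(M[pos]+diffFinal//2))
--             diffFinal = 0
--
--     for i in range(1, len(M)):
--         diff1 = (M[i] - M[i-1])
--         if diff1 > diffFinal:
--             diffFinal = diff1
--
--     return diffFinal
-- ===== SOURCE B (Python) =====
-- def splits(g, t):
--     # number of floor/ceil halving splits needed to reduce a gap g to pieces <= t
--     if t < 1 or g <= t:
--         return 0
--     h = g // 2
--     return 1 + splits(h, t) + splits(g - h, t)
--
--
-- def needsum(gaps, t):
--     s = 0
--     for g in gaps:
--         s = s + splits(g, t)
--     return s
--
--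
-- def Solve(N, K, M):
--     gaps = [b - a for a, b in zip(M, M[1:])]
--     if K < 1:
--         ans = 0
--         for g in gaps:
--             if g > ans:
--                 ans = g
--         return ans
--     hi = max(gaps) if gaps else 1
--     if hi < 1:
--         hi = 1
--     lo = 1
--     while lo < hi:
--         mid = (lo + hi) // 2
--         if needsum(gaps, mid) <= K:
--             hi = mid
--         else:
--             lo = mid + 1
--     return lo
-- ===== Notes on version B (the rewrite author's own statement) =====
-- stated objective: faster
-- what changed: B binary-searches the answer: it finds the least t >= 1 such that the total number of floor/ceil halving splits needed to bring every adjacent gap down to pieces <= t is at most K, using a recursive per-gap split count; A instead simulates K rounds, each re-scanning the point list and inserting a midpoint.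
import Mathlib
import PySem

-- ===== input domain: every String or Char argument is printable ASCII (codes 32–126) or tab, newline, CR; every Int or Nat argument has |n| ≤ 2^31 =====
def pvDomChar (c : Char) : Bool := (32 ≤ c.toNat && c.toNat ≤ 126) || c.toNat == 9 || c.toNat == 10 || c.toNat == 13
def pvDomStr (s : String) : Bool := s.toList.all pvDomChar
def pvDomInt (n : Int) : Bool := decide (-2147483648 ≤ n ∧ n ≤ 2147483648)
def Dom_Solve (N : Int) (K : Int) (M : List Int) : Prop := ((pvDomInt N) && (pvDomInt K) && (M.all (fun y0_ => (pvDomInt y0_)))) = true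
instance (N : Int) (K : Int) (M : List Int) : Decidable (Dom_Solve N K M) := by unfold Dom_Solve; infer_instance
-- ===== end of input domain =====

-- B binary-searches the final maximal gap (least t ≥ 1 whose total halving-split count is ≤ K)
-- instead of simulating K midpoint insertions into M; faster, and unlike A, B does not mutate M
-- (the equivalence proved here is about the return value).

-- ===== PORT A =====
-- one iteration of A's `for x in range(K)` body: state = (M, diffFinal)
def SolveStepA (M : List Int) (df0 : Int) : List Int × Int :=
  if M.length = 1 then
    (PySem.List.insert M 1 (PySem.List.pyGetD M (-1) 0 + 1), df0)
  else
    -- inner `for i in range(1, len(M))`, state (diffFinal, pos); pos is unbound in Python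
    -- before its first assignment, modelled by the junk initial value 0 (Pre_ excludes the
    -- only inputs on which Python would read it unassigned)
    let s := (PySem.List.pyRange 1 (M.length : Int) 1).foldl (fun (st : Int × Int) i =>
        let diff1 := PySem.List.pyGetD M i 0 - PySem.List.pyGetD M (i-1) 0
        let st1 := if diff1 > st.1 ∧ diff1 > 1 then (diff1, i - 1) else st
        if i = (M.length : Int) - 1 ∧ st1.1 = 0 then (2, (M.length : Int) - 1) else st1)
      (df0, 0)
    (PySem.List.insert M (s.2 + 1) (PySem.List.pyGetD M s.2 0 + PySem.Int.floordiv s.1 2), 0)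

def Solve (N : Int) (K : Int) (M : List Int) : Int :=
  if K = 1 ∧ M.length = 1 then
    (PySem.List.pyGetD M 0 0 + 1) - PySem.List.pyGetD M 0 0
  else
    let r := (PySem.List.pyRange 0 K 1).foldl (fun st _ => SolveStepA st.1 st.2) (M, (0 : Int))
    (PySem.List.pyRange 1 (r.1.length : Int) 1).foldl (fun df i =>
        let diff1 := PySem.List.pyGetD r.1 i 0 - PySem.List.pyGetD r.1 (i-1) 0
        if diff1 > df then diff1 else df) r.2

-- ===== PORT B =====
-- number of floor/ceil halving splits needed to reduce a gap g to pieces ≤ t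
-- (the `t < 1` early return is Source B's own totalisation guard; B only calls splits with t ≥ 1;
-- the fuel argument only makes the recursion structural: g.toNat + 1 always suffices, since
-- each recursive call strictly shrinks g when the guard fails)
def splitsF : Nat → Int → Int → Int
  | 0, _, _ => 0
  | f + 1, g, t =>
    if t < 1 ∨ g ≤ t then 0
    else 1 + splitsF f (PySem.Int.floordiv g 2) t + splitsF f (g - PySem.Int.floordiv g 2) t

def splits (g t : Int) : Int := splitsF (g.toNat + 1) g t

def needSum (gaps : List Int) (t : Int) : Int :=
  gaps.foldl (fun s g => s + splits g t) 0

-- the `while lo < hi` binary-search loop of Source B (fuel = totalisation: (hi-lo).toNat + 1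
-- always suffices, the interval shrinks every iteration)
def bsearchF : Nat → List Int → Int → Int → Int → Int
  | 0, _, _, lo, _ => lo
  | f + 1, gaps, K, lo, hi =>
    if lo < hi then
      if needSum gaps (PySem.Int.floordiv (lo + hi) 2) ≤ K then
        bsearchF f gaps K lo (PySem.Int.floordiv (lo + hi) 2)
      else
        bsearchF f gaps K (PySem.Int.floordiv (lo + hi) 2 + 1) hi
    else lo

def bsearch (gaps : List Int) (K lo hi : Int) : Int :=
  bsearchF ((hi - lo).toNat + 1) gaps K lo hi

def Solve_alt (N : Int) (K : Int) (M : List Int) : Int :=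
  let gaps := (M.zip (PySem.List.slice M (some 1) none)).map (fun p => p.2 - p.1)
  if K < 1 then
    gaps.foldl (fun ans g => if g > ans then g else ans) 0
  else
    let hi0 := match PySem.List.max? gaps (fun x => x) with
               | none => 1
               | some d => d
    bsearch gaps K 1 (if hi0 < 1 then 1 else hi0)

-- ===== PRECONDITION & SPEC =====
-- Pre_ excludes only M = [] with K ≥ 1, on which A raises UnboundLocalError (pos is read
-- before any assignment).
def Pre_Solve (N : Int) (K : Int) (M : List Int) : Prop := M ≠ [] ∨ K ≤ 0
instance (N : Int) (K : Int) (M : List Int) : Decidable (Pre_Solve N K M) := by unfold Pre_Solve; infer_instance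
def pvWitness_Solve : Int × Int × List Int := (0, 2, [1, 9])

def Spec_Solve (N : Int) (K : Int) (M : List Int) (out : Int) : Prop := out = Solve_alt N K M
instance (N : Int) (K : Int) (M : List Int) (out : Int) : Decidable (Spec_Solve N K M out) := by unfold Spec_Solve; infer_instance

-- ===== CLAIM (what is proved, stated in full; the proofs are below) =====
def Claim_equal_Solve : Prop := ∀ (N : Int) (K : Int) (M : List Int), Dom_Solve N K M → Pre_Solve N K M → Spec_Solve N K M (Solve N K M)

-- ===== LEMMAS AND PROOFS =====

-- the list of adjacent gaps of M (what B's comprehension builds)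
def gapsOf (M : List Int) : List Int := (M.zip (M.drop 1)).map (fun p => p.2 - p.1)

-- one round of the greedy process on the gap list, as A performs it (proof-side model):
-- split the first maximal gap d > 1 into floor/ceil halves, else append a unit gap
def gstep (gaps : List Int) : List Int :=
  if gaps = [] then gaps ++ [1]
  else
    match PySem.List.max? gaps (fun x => x) with
    | none => gaps ++ [1]        -- unreachable: gaps ≠ []
    | some d =>
      if d > 1 then
        match PySem.List.index? gaps d with
        | none => gaps           -- unreachable: d ∈ gaps
        | some i =>
          gaps.take i ++ [PySem.Int.floordiv d 2, d - PySem.Int.floordiv d 2] ++ gaps.drop (i+1)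
      else gaps ++ [1]

-- A's inner scan as a pure recursion over the gap list (j = 0-based gap index)
def fmax : List Int → Int × Int → Int → Int × Int
  | [], st, _ => st
  | x :: xs, st, j => fmax xs (if x > st.1 ∧ x > 1 then (x, j) else st) (j + 1)

theorem gapsOf_singleton (a : Int) : gapsOf [a] = [] := rfl

theorem gapsOf_cons (a : Int) (B : List Int) (hB : B ≠ []) :
    gapsOf (a :: B) = (B.headI - a) :: gapsOf B := by
  cases B with
  | nil => exact absurd rfl hB
  | cons b t => simp [gapsOf]

theorem length_gapsOf (M : List Int) : (gapsOf M).length = M.length - 1 := by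
  simp [gapsOf]

theorem gapsOf_getElem (M : List Int) (i : Nat) (h : i < (gapsOf M).length) :
    (gapsOf M)[i] =
      M[i+1]'(by have := length_gapsOf M; omega) - M[i]'(by have := length_gapsOf M; omega) := by
  simp only [gapsOf, List.getElem_map, List.getElem_zip, List.getElem_drop]
  congr 2
  omega

theorem gapsOf_append (A B : List Int) (hA : A ≠ []) (hB : B ≠ []) :
    gapsOf (A ++ B) = gapsOf A ++ (B.headI - A.getLast hA) :: gapsOf B := by
  induction A with
  | nil => exact absurd rfl hA
  | cons a A' ih =>
    cases A' with
    | nil =>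
      rw [List.cons_append, List.nil_append, gapsOf_cons a B hB, gapsOf_singleton]
      simp
    | cons a2 t2 =>
      rw [List.cons_append, gapsOf_cons a ((a2 :: t2) ++ B) (by simp), ih (by simp),
          gapsOf_cons a (a2 :: t2) (by simp)]
      have hhead : ((a2 :: t2) ++ B).headI = (a2 :: t2 : List Int).headI := rfl
      rw [hhead, List.getLast_cons (by simp : (a2 :: t2 : List Int) ≠ [])]
      simp

theorem gapsOf_take (M : List Int) (p : Nat) (hp : p + 1 ≤ M.length) :
    gapsOf (M.take (p+1)) = (gapsOf M).take p := by
  have h1 := length_gapsOf M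
  have h2 := length_gapsOf (M.take (p+1))
  apply List.ext_getElem
  · simp at h2 ⊢; omega
  · intro i hi hi'
    have hlt : i < (gapsOf M).length := by simp at h2; omega
    rw [List.getElem_take, gapsOf_getElem _ _ hi, gapsOf_getElem _ _ hlt]
    rw [List.getElem_take, List.getElem_take]

theorem gapsOf_drop (M : List Int) (p : Nat) :
    gapsOf (M.drop (p+1)) = (gapsOf M).drop (p+1) := by
  have h1 := length_gapsOf M
  have h2 := length_gapsOf (M.drop (p+1))
  apply List.ext_getElem
  · simp at h2 ⊢; omega
  · intro i hi hi'
    have hlt : p + 1 + i < (gapsOf M).length := by simp at h2; omega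
    rw [List.getElem_drop, gapsOf_getElem _ _ hi, gapsOf_getElem _ _ hlt]
    rw [List.getElem_drop, List.getElem_drop]
    congr 2

theorem fmax_of_small (g : List Int) (st : Int × Int) (j : Int)
    (h : ∀ x ∈ g, ¬(x > st.1 ∧ x > 1)) : fmax g st j = st := by
  induction g generalizing st j with
  | nil => rfl
  | cons x xs ih =>
    rw [fmax, if_neg (h x (by simp))]
    exact ih st (j+1) (fun y hy => h y (by simp [hy]))

theorem fmax_of_max (g : List Int) (st : Int × Int) (j : Int) (d : Int) (p : Nat)
    (hidx : PySem.List.index? g d = some p) (hmax : ∀ y ∈ g, y ≤ d)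
    (h1 : st.1 < d) (h2 : 1 < d) :
    fmax g st j = (d, j + (p : Int)) := by
  induction g generalizing st j p with
  | nil => simp [PySem.List.index?_eq_idxOf?] at hidx
  | cons x xs ih =>
    by_cases hxd : x = d
    · subst hxd
      rw [PySem.List.index?_cons_self] at hidx
      injection hidx with hp
      subst hp
      rw [fmax, if_pos ⟨h1, h2⟩]
      rw [fmax_of_small xs (x, j) (j+1)
        (fun y hy => by
          have := hmax y (by simp [hy])
          simp only [not_and, not_lt]
          intro hgt; omega)]
      simp
    · rw [PySem.List.index?_cons_of_ne xs hxd] at hidx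
      rcases Option.map_eq_some_iff.mp hidx with ⟨p', hp', hpp⟩
      subst hpp
      have hxlt : x < d := lt_of_le_of_ne (hmax x (by simp)) hxd
      rw [fmax]
      by_cases hx : x > st.1 ∧ x > 1
      · rw [if_pos hx, ih (x, j) (j+1) p' hp' (fun y hy => hmax y (by simp [hy])) hxlt]
        simp only [Prod.mk.injEq, true_and]
        push_cast
        ring
      · rw [if_neg hx, ih st (j+1) p' hp' (fun y hy => hmax y (by simp [hy])) h1]
        simp only [Prod.mk.injEq, true_and]
        push_cast
        ring

-- bridge: A's index fold over range(k, len(M)) equals fmax on the gap suffix, patched by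
-- the last-iteration special case
theorem scan_bridge (M : List Int) :
    ∀ (c : Nat) (k : Nat) (st : Int × Int), k + c = M.length → 1 ≤ k → k < M.length →
    (PySem.List.pyRange (k : Int) (M.length : Int) 1).foldl (fun (st : Int × Int) i =>
        let diff1 := PySem.List.pyGetD M i 0 - PySem.List.pyGetD M (i-1) 0
        let st1 := if diff1 > st.1 ∧ diff1 > 1 then (diff1, i - 1) else st
        if i = (M.length : Int) - 1 ∧ st1.1 = 0 then (2, (M.length : Int) - 1) else st1) st
    = (let r := fmax ((gapsOf M).drop (k - 1)) st ((k : Int) - 1);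
       if r.1 = 0 then (2, (M.length : Int) - 1) else r) := by
  intro c
  induction c with
  | zero => intro k st hkc _ hklt; omega
  | succ c ih =>
    intro k st hkc hk1 hklt
    have hg := length_gapsOf M
    have hcons : PySem.List.pyRange (k : Int) (M.length : Int) 1
        = (k : Int) :: PySem.List.pyRange ((k : Int) + 1) (M.length : Int) 1 :=
      PySem.List.pyRange_one_cons (by exact_mod_cast hklt)
    have hkm1 : ((k : Int)) - 1 = ((k - 1 : Nat) : Int) := by omega
    have hgk : (gapsOf M)[k-1]'(by omega)
        = M[k]'(by omega) - M[k-1]'(by omega) := by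
      rw [gapsOf_getElem]
      congr 2
      omega
    have hget1 : PySem.List.pyGetD M (k : Int) 0 = M[k]'(by omega) := by
      rw [PySem.List.pyGetD_natCast, List.getD_eq_getElem]
    have hget2 : PySem.List.pyGetD M ((k : Int) - 1) 0 = M[k-1]'(by omega) := by
      rw [hkm1, PySem.List.pyGetD_natCast, List.getD_eq_getElem]
    have hdiffeq : PySem.List.pyGetD M (k : Int) 0 - PySem.List.pyGetD M ((k : Int) - 1) 0
        = (gapsOf M)[k-1]'(by omega) := by rw [hget1, hget2, hgk]
    have hdk : (gapsOf M).drop (k - 1)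
        = ((gapsOf M)[k-1]'(by omega)) :: (gapsOf M).drop (k - 1 + 1) :=
      List.drop_eq_getElem_cons (by omega)
    rw [Nat.sub_add_cancel hk1] at hdk
    rw [hcons, List.foldl_cons, hdk]
    by_cases hlast : k + 1 = M.length
    · -- last iteration: the range ahead is empty and the special test may fire
      have hempty : PySem.List.pyRange ((k : Int) + 1) (M.length : Int) 1 = [] :=
        PySem.List.pyRange_one_eq_nil (by exact_mod_cast Nat.le_of_eq hlast.symm)
      have hdrop : (gapsOf M).drop k = ([] : List Int) := List.drop_eq_nil_of_le (by omega)
      have hkeq : (k : Int) = (M.length : Int) - 1 := by omega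
      rw [hempty, List.foldl_nil, hdrop]
      simp only [fmax, hdiffeq]
      rw [hkeq]
      simp only [true_and]
    · -- not the last iteration: the special test is false; one plain fmax step, then IH
      have hknl : ¬ ((k : Int) = (M.length : Int) - 1 ∧
          (if (gapsOf M)[k-1]'(by omega) > st.1 ∧ (gapsOf M)[k-1]'(by omega) > 1
           then ((gapsOf M)[k-1]'(by omega), (k : Int) - 1) else st).1 = 0) := by
        intro h
        have := h.1
        omega
      simp only [hdiffeq]
      rw [if_neg hknl]
      have hih := ih (k+1)
        (if (gapsOf M)[k-1]'(by omega) > st.1 ∧ (gapsOf M)[k-1]'(by omega) > 1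
         then ((gapsOf M)[k-1]'(by omega), (k : Int) - 1) else st)
        (by omega) (by omega) (by omega)
      simp only [Nat.add_sub_cancel] at hih
      push_cast at hih
      rw [show ((k : Int) + 1 - 1) = (k : Int) by ring] at hih
      rw [hih]
      simp only [fmax]
      rw [show ((k : Int) - 1 + 1) = (k : Int) by ring]

-- final scan of A = running-max fold over the gaps
theorem final_bridge_aux (M : List Int) :
    ∀ (c : Nat) (k : Nat) (st : Int), k + c = M.length → 1 ≤ k →
    (PySem.List.pyRange (k : Int) (M.length : Int) 1).foldl (fun df i =>
        let diff1 := PySem.List.pyGetD M i 0 - PySem.List.pyGetD M (i-1) 0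
        if diff1 > df then diff1 else df) st
    = ((gapsOf M).drop (k - 1)).foldl (fun a x => if x > a then x else a) st := by
  intro c
  induction c with
  | zero =>
    intro k st hkc _
    have hg := length_gapsOf M
    rw [PySem.List.pyRange_one_eq_nil (by omega), List.drop_eq_nil_of_le (by omega),
        List.foldl_nil, List.foldl_nil]
  | succ c ih =>
    intro k st hkc hk1
    have hg := length_gapsOf M
    have hklt : k < M.length := by omega
    have hcons : PySem.List.pyRange (k : Int) (M.length : Int) 1
        = (k : Int) :: PySem.List.pyRange ((k : Int) + 1) (M.length : Int) 1 :=
      PySem.List.pyRange_one_cons (by exact_mod_cast hklt)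
    have hkm1 : ((k : Int)) - 1 = ((k - 1 : Nat) : Int) := by omega
    have hgk : (gapsOf M)[k-1]'(by omega)
        = M[k]'(by omega) - M[k-1]'(by omega) := by
      rw [gapsOf_getElem]
      congr 2
      omega
    have hget1 : PySem.List.pyGetD M (k : Int) 0 = M[k]'(by omega) := by
      rw [PySem.List.pyGetD_natCast, List.getD_eq_getElem]
    have hget2 : PySem.List.pyGetD M ((k : Int) - 1) 0 = M[k-1]'(by omega) := by
      rw [hkm1, PySem.List.pyGetD_natCast, List.getD_eq_getElem]
    have hdk : (gapsOf M).drop (k - 1)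
        = ((gapsOf M)[k-1]'(by omega)) :: (gapsOf M).drop (k - 1 + 1) :=
      List.drop_eq_getElem_cons (by omega)
    rw [Nat.sub_add_cancel hk1] at hdk
    rw [hcons, List.foldl_cons, hdk, List.foldl_cons]
    simp only [hget1, hget2, hgk]
    have hih := ih (k+1) (if M[k]'(by omega) - M[k-1]'(by omega) > st
        then M[k]'(by omega) - M[k-1]'(by omega) else st) (by omega) (by omega)
    simp only [Nat.add_sub_cancel] at hih
    push_cast at hih
    exact hih

theorem final_bridge (M : List Int) (c : Int) :
    (PySem.List.pyRange 1 (M.length : Int) 1).foldl (fun df i =>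
        let diff1 := PySem.List.pyGetD M i 0 - PySem.List.pyGetD M (i-1) 0
        if diff1 > df then diff1 else df) c
    = (gapsOf M).foldl (fun a x => if x > a then x else a) c := by
  cases hM : M with
  | nil => rfl
  | cons m t =>
    rw [← hM]
    have hlen : 1 ≤ M.length := by rw [hM]; simp
    have := final_bridge_aux M (M.length - 1) 1 c (by omega) (by omega)
    simpa using this

-- one round: A's step tracks the greedy gap step through gapsOf
theorem step_bridge (M : List Int) (hM : M ≠ []) :
    SolveStepA M 0 = ((SolveStepA M 0).1, 0) ∧ (SolveStepA M 0).1 ≠ [] ∧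
    gapsOf (SolveStepA M 0).1 = gstep (gapsOf M) := by
  by_cases h1 : M.length = 1
  · -- singleton: A appends M[-1]+1; the greedy step appends a unit gap to the empty gap list
    match M, h1 with
    | [m], _ =>
      have hA : SolveStepA [m] 0 = ([m, m+1], 0) := rfl
      rw [hA]
      refine ⟨rfl, by simp, ?_⟩
      show gapsOf [m, m+1] = gstep (gapsOf [m])
      rw [gapsOf_singleton]
      rw [show gstep ([] : List Int) = [1] from rfl]
      simp [gapsOf]
  · -- len ≥ 2: the inner scan finds the first maximal gap (or falls back to appending)
    have hlen2 : 2 ≤ M.length := by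
      have : M.length ≠ 0 := by simpa using hM
      omega
    have hg := length_gapsOf M
    have hgne : gapsOf M ≠ [] := by
      intro h
      have := congrArg List.length h
      simp [hg] at this
      omega
    obtain ⟨d, hd⟩ : ∃ d, PySem.List.max? (gapsOf M) (fun x => x) = some d := by
      cases h : PySem.List.max? (gapsOf M) (fun x => x) with
      | none => exact absurd ((PySem.List.max?_eq_none_iff _ _).mp h) hgne
      | some d => exact ⟨d, rfl⟩
    have hmax : ∀ y ∈ gapsOf M, y ≤ d := fun y hy => PySem.List.max?_isMax hd y hy
    have hsc := scan_bridge M (M.length - 1) 1 (0, 0) (by omega) (le_refl 1) (by omega)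
    simp only [Nat.cast_one, Nat.sub_self, List.drop_zero, sub_self] at hsc
    by_cases hd1 : d > 1
    · -- split case
      have hmem : d ∈ gapsOf M := PySem.List.max?_mem hd
      obtain ⟨p, hp⟩ : ∃ p, PySem.List.index? (gapsOf M) d = some p :=
        Option.isSome_iff_exists.mp ((PySem.List.index?_isSome_iff _ _).mpr hmem)
      obtain ⟨hplt, hgp, -⟩ := PySem.List.getElem_of_index?_eq_some hp
      have hfm := fmax_of_max (gapsOf M) (0, 0) 0 d p hp hmax (by simpa using (by omega : (0:Int) < d)) hd1
      rw [hfm] at hsc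
      have hdne : ¬ ((d, (0 : Int) + (p : Int)).1 = 0) := by simp; omega
      rw [if_neg hdne] at hsc
      have hA : SolveStepA M 0 =
          (M.take (p+1) ++ (M[p]'(by omega) + PySem.Int.floordiv d 2) :: M.drop (p+1), 0) := by
        unfold SolveStepA
        rw [if_neg h1]
        simp only [hsc]
        rw [show ((0 : Int) + (p : Int) + 1) = ((p + 1 : Nat) : Int) by push_cast; ring]
        rw [show ((0 : Int) + (p : Int)) = ((p : Nat) : Int) by push_cast; ring]
        rw [PySem.List.insert_natCast M (p+1) _ (by omega),
            PySem.List.pyGetD_natCast, List.getD_eq_getElem M 0 (by omega)]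
      rw [hA]
      refine ⟨rfl, by simp, ?_⟩
      show gapsOf (M.take (p+1) ++ (M[p]'(by omega) + PySem.Int.floordiv d 2) :: M.drop (p+1))
          = gstep (gapsOf M)
      unfold gstep
      rw [if_neg hgne]
      split
      · next heq => rw [hd] at heq; cases heq
      · next d' heq =>
        rw [hd] at heq
        injection heq with heqd
        subst heqd
        rw [if_pos hd1]
        split
        · next heq2 => rw [hp] at heq2; cases heq2
        · next i heq2 =>
          rw [hp] at heq2
          injection heq2 with heqi
          subst heqi
          have hplen : p + 1 < M.length := by
            have h' := hplt
            rw [hg] at h'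
            omega
          have hTne : M.take (p+1) ≠ [] := by
            have hl : (M.take (p+1)).length = p + 1 := by simp; omega
            intro h
            rw [h] at hl
            simp at hl
          have hDne : M.drop (p+1) ≠ [] := by
            have hl : (M.drop (p+1)).length = M.length - (p+1) := by simp
            intro h
            rw [h] at hl
            simp at hl
            omega
          rw [gapsOf_append (M.take (p+1)) _ hTne (by simp),
              gapsOf_cons _ (M.drop (p+1)) hDne,
              gapsOf_take M p (by omega), gapsOf_drop M p]
          have hTlast : (M.take (p+1)).getLast hTne = M[p]'(by omega) := by
            rw [List.getLast_eq_getElem]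
            rw [List.getElem_take]
            have hidx : min (p + 1) M.length - 1 = p := by omega
            simp [hidx]
          have hDhead : (M.drop (p+1)).headI = M[p+1]'(by omega) := by
            rw [List.drop_eq_getElem_cons (by omega : p + 1 < M.length)]
            rfl
          have hgapval : M[p+1]'(by omega) - M[p]'(by omega) = d := by
            rw [← gapsOf_getElem M p (by omega), hgp]
          simp only [List.headI_cons, hTlast, hDhead]
          have e1 : M[p]'(by omega) + PySem.Int.floordiv d 2 - M[p]'(by omega)
              = PySem.Int.floordiv d 2 := by ring
          have e2 : M[p+1]'(by omega) - (M[p]'(by omega) + PySem.Int.floordiv d 2)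
              = d - PySem.Int.floordiv d 2 := by omega
          rw [e1, e2]
          simp
    · -- no gap exceeds 1: A appends last+1; the greedy step appends a unit gap
      have hsmall : ∀ x ∈ gapsOf M, ¬(x > (0 : Int) ∧ x > 1) := by
        intro x hx h
        have := hmax x hx
        omega
      rw [fmax_of_small (gapsOf M) (0, 0) 0 hsmall] at hsc
      rw [if_pos rfl] at hsc
      have hA : SolveStepA M 0 = (M ++ [M[M.length - 1]'(by omega) + 1], 0) := by
        unfold SolveStepA
        rw [if_neg h1]
        simp only [hsc]
        rw [show ((M.length : Int) - 1 + 1) = ((M.length : Nat) : Int) by ring]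
        rw [show ((M.length : Int) - 1) = ((M.length - 1 : Nat) : Int) by omega]
        rw [PySem.List.insert_natCast M M.length _ (le_refl _),
            PySem.List.pyGetD_natCast, List.getD_eq_getElem M 0 (by omega),
            List.take_length, List.drop_length]
        rw [show PySem.Int.floordiv 2 2 = 1 by decide]
      rw [hA]
      refine ⟨rfl, by simp, ?_⟩
      show gapsOf (M ++ [M[M.length - 1]'(by omega) + 1]) = gstep (gapsOf M)
      unfold gstep
      rw [if_neg hgne]
      split
      · next heq => rw [hd] at heq; cases heq
      · next d' heq =>
        rw [hd] at heq
        injection heq with heqd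
        subst heqd
        rw [if_neg hd1]
        rw [gapsOf_append M _ hM (by simp), gapsOf_singleton]
        have hlast : M.getLast hM = M[M.length - 1]'(by omega) := List.getLast_eq_getElem hM
        simp [hlast]

theorem loop_bridge (L : List Int) (M : List Int) (hM : M ≠ []) :
    (L.foldl (fun st _ => SolveStepA st.1 st.2) (M, (0 : Int))).2 = 0 ∧
    (L.foldl (fun st _ => SolveStepA st.1 st.2) (M, (0 : Int))).1 ≠ [] ∧
    gapsOf (L.foldl (fun st _ => SolveStepA st.1 st.2) (M, (0 : Int))).1
      = L.foldl (fun g _ => gstep g) (gapsOf M) := by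
  induction L generalizing M with
  | nil => exact ⟨rfl, hM, rfl⟩
  | cons x L ih =>
    obtain ⟨h2, hne, hg⟩ := step_bridge M hM
    rw [List.foldl_cons, List.foldl_cons]
    rw [h2]
    obtain ⟨ih2, ihne, ihg⟩ := ih (SolveStepA M 0).1 hne
    exact ⟨ih2, ihne, by rw [ihg, hg]⟩

theorem alt_gaps (M : List Int) :
    (M.zip (PySem.List.slice M (some 1) none)).map (fun p => p.2 - p.1) = gapsOf M := by
  rw [PySem.List.slice_from_one, ← List.drop_one]
  rfl

-- ===== splits / needSum arithmetic =====

theorem splitsF_congr : ∀ (f1 f2 : Nat) (g t : Int), g.toNat < f1 → g.toNat < f2 →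
    splitsF f1 g t = splitsF f2 g t := by
  intro f1
  induction f1 with
  | zero => intro f2 g t h1 h2; omega
  | succ f ih =>
    intro f2 g t h1 h2
    cases f2 with
    | zero => omega
    | succ f2' =>
      show (if t < 1 ∨ g ≤ t then 0
            else 1 + splitsF f (PySem.Int.floordiv g 2) t
              + splitsF f (g - PySem.Int.floordiv g 2) t)
          = (if t < 1 ∨ g ≤ t then 0
            else 1 + splitsF f2' (PySem.Int.floordiv g 2) t
              + splitsF f2' (g - PySem.Int.floordiv g 2) t)
      by_cases hc : t < 1 ∨ g ≤ t
      · rw [if_pos hc, if_pos hc]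
      · have he : PySem.Int.floordiv g 2 = g / 2 :=
          PySem.Int.floordiv_eq_ediv_of_pos (by omega : (0:Int) < 2)
        rw [if_neg hc, if_neg hc,
            ih f2' (PySem.Int.floordiv g 2) t (by rw [he]; omega) (by rw [he]; omega),
            ih f2' (g - PySem.Int.floordiv g 2) t (by rw [he]; omega) (by rw [he]; omega)]

theorem splits_eq (g t : Int) :
    splits g t = if t < 1 ∨ g ≤ t then 0
      else 1 + splits (PySem.Int.floordiv g 2) t + splits (g - PySem.Int.floordiv g 2) t := by
  unfold splits
  show (if t < 1 ∨ g ≤ t then 0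
        else 1 + splitsF g.toNat (PySem.Int.floordiv g 2) t
          + splitsF g.toNat (g - PySem.Int.floordiv g 2) t) = _
  by_cases hc : t < 1 ∨ g ≤ t
  · rw [if_pos hc, if_pos hc]
  · have he : PySem.Int.floordiv g 2 = g / 2 :=
      PySem.Int.floordiv_eq_ediv_of_pos (by omega : (0:Int) < 2)
    rw [if_neg hc, if_neg hc,
        splitsF_congr g.toNat ((PySem.Int.floordiv g 2).toNat + 1) _ t
          (by rw [he]; omega) (by omega),
        splitsF_congr g.toNat ((g - PySem.Int.floordiv g 2).toNat + 1) _ t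
          (by rw [he]; omega) (by omega)]

theorem splits_eq_zero (g t : Int) (h : g ≤ t) : splits g t = 0 := by
  rw [splits_eq, if_pos (Or.inr h)]

theorem splitsF_nonneg : ∀ (f : Nat) (g t : Int), 0 ≤ splitsF f g t := by
  intro f
  induction f with
  | zero => intro g t; exact le_refl 0
  | succ f ih =>
    intro g t
    show 0 ≤ (if t < 1 ∨ g ≤ t then 0
      else 1 + splitsF f (PySem.Int.floordiv g 2) t + splitsF f (g - PySem.Int.floordiv g 2) t)
    have h1 := ih (PySem.Int.floordiv g 2) t
    have h2 := ih (g - PySem.Int.floordiv g 2) t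
    split_ifs <;> omega

theorem splits_nonneg (g t : Int) : 0 ≤ splits g t := splitsF_nonneg _ g t

theorem splits_pos (g t : Int) (h1 : 1 ≤ t) (h2 : t < g) : 1 ≤ splits g t := by
  rw [splits_eq, if_neg (by omega)]
  have ha := splits_nonneg (PySem.Int.floordiv g 2) t
  have hb := splits_nonneg (g - PySem.Int.floordiv g 2) t
  omega

theorem splitsF_anti : ∀ (f : Nat) (g t t' : Int), 1 ≤ t → t ≤ t' →
    splitsF f g t' ≤ splitsF f g t := by
  intro f
  induction f with
  | zero => intro g t t' _ _; exact le_refl 0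
  | succ f ih =>
    intro g t t' h0 h
    show (if t' < 1 ∨ g ≤ t' then 0
        else 1 + splitsF f (PySem.Int.floordiv g 2) t' + splitsF f (g - PySem.Int.floordiv g 2) t')
      ≤ (if t < 1 ∨ g ≤ t then 0
        else 1 + splitsF f (PySem.Int.floordiv g 2) t + splitsF f (g - PySem.Int.floordiv g 2) t)
    by_cases hz : t' < 1 ∨ g ≤ t'
    · rw [if_pos hz]
      show (0 : Int) ≤ splitsF (f + 1) g t
      exact splitsF_nonneg _ g t
    · rw [if_neg hz, if_neg (by omega)]
      have h1 := ih (PySem.Int.floordiv g 2) t t' h0 h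
      have h2 := ih (g - PySem.Int.floordiv g 2) t t' h0 h
      omega

theorem splits_anti (g t t' : Int) (h0 : 1 ≤ t) (h : t ≤ t') : splits g t' ≤ splits g t :=
  splitsF_anti _ g t t' h0 h

theorem needSum_shift (t a : Int) (l : List Int) :
    l.foldl (fun s g => s + splits g t) a = a + needSum l t := by
  induction l generalizing a with
  | nil => simp [needSum]
  | cons x l ih =>
    rw [List.foldl_cons]
    unfold needSum
    rw [List.foldl_cons, ih, ih (0 + splits x t)]
    ring

theorem needSum_nil (t : Int) : needSum [] t = 0 := rfl

theorem needSum_cons (x : Int) (l : List Int) (t : Int) :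
    needSum (x :: l) t = splits x t + needSum l t := by
  unfold needSum
  rw [List.foldl_cons, needSum_shift]
  unfold needSum
  omega

theorem needSum_append (l1 l2 : List Int) (t : Int) :
    needSum (l1 ++ l2) t = needSum l1 t + needSum l2 t := by
  unfold needSum
  rw [List.foldl_append, needSum_shift]
  rfl

theorem needSum_nonneg (l : List Int) (t : Int) : 0 ≤ needSum l t := by
  induction l with
  | nil => simp [needSum_nil]
  | cons x l ih =>
    rw [needSum_cons]
    have := splits_nonneg x t
    omega

theorem needSum_zero_of_all_le (l : List Int) (t : Int) (h : ∀ g ∈ l, g ≤ t) :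
    needSum l t = 0 := by
  induction l with
  | nil => rfl
  | cons x l ih =>
    rw [needSum_cons, splits_eq_zero x t (h x (by simp)), ih (fun g hg => h g (by simp [hg]))]
    omega

theorem needSum_pos (l : List Int) (t x : Int) (hx : x ∈ l) (ht : 1 ≤ t) (h : t < x) :
    1 ≤ needSum l t := by
  induction l with
  | nil => simp at hx
  | cons y l ih =>
    rw [needSum_cons]
    rcases List.mem_cons.mp hx with h1 | h2
    · have := needSum_nonneg l t
      have := splits_pos y t ht (by omega)
      omega
    · have := ih h2
      have := splits_nonneg y t
      omega

theorem needSum_anti (l : List Int) (t t' : Int) (h0 : 1 ≤ t) (h : t ≤ t') :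
    needSum l t' ≤ needSum l t := by
  induction l with
  | nil => simp [needSum_nil]
  | cons x l ih =>
    rw [needSum_cons, needSum_cons]
    have := splits_anti x t t' h0 h
    omega

theorem floordiv_two_bounds (d : Int) (h : 2 ≤ d) :
    1 ≤ PySem.Int.floordiv d 2 ∧ PySem.Int.floordiv d 2 ≤ d - 1 := by
  rw [PySem.Int.floordiv_eq_ediv_of_pos (by omega : (0:Int) < 2)]
  omega

-- ===== the greedy process and its characterisation =====

def iterN : Nat → List Int → List Int
  | 0, g => g
  | n + 1, g => iterN n (gstep g)

def maxfold0 (l : List Int) : Int := l.foldl (fun a x => if x > a then x else a) 0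

theorem maxfoldA_ge_init (l : List Int) : ∀ a : Int,
    a ≤ l.foldl (fun a x => if x > a then x else a) a := by
  induction l with
  | nil => intro a; simp
  | cons x l ih =>
    intro a
    rw [List.foldl_cons]
    have := ih (if x > a then x else a)
    split_ifs at this ⊢ <;> omega

theorem maxfoldA_ge_mem (l : List Int) : ∀ (a x : Int), x ∈ l →
    x ≤ l.foldl (fun a x => if x > a then x else a) a := by
  induction l with
  | nil => intro a x hx; simp at hx
  | cons y l ih =>
    intro a x hx
    rw [List.foldl_cons]
    rcases List.mem_cons.mp hx with h1 | h2
    · subst h1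
      have := maxfoldA_ge_init l (if x > a then x else a)
      split_ifs at this ⊢ <;> omega
    · exact ih _ x h2

theorem maxfoldA_le (l : List Int) : ∀ (a c : Int), a ≤ c → (∀ x ∈ l, x ≤ c) →
    l.foldl (fun a x => if x > a then x else a) a ≤ c := by
  induction l with
  | nil => intro a c h _; simpa using h
  | cons y l ih =>
    intro a c h hall
    rw [List.foldl_cons]
    refine ih _ c ?_ (fun x hx => hall x (by simp [hx]))
    have := hall y (by simp)
    split_ifs <;> omega

theorem maxfoldA_mem_or (l : List Int) : ∀ a : Int,
    l.foldl (fun a x => if x > a then x else a) a = a ∨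
    l.foldl (fun a x => if x > a then x else a) a ∈ l := by
  induction l with
  | nil => intro a; simp
  | cons y l ih =>
    intro a
    rw [List.foldl_cons]
    rcases ih (if y > a then y else a) with h | h
    · rw [h]
      split_ifs at h ⊢
      · right; simp [h]
      · left; rfl
    · right; simp [h]

theorem le_maxfold0 (l : List Int) (x : Int) (hx : x ∈ l) : x ≤ maxfold0 l :=
  maxfoldA_ge_mem l 0 x hx

theorem maxfold0_le (l : List Int) (c : Int) (h0 : 0 ≤ c) (h : ∀ x ∈ l, x ≤ c) :
    maxfold0 l ≤ c := maxfoldA_le l 0 c h0 h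

theorem maxfold0_mem (l : List Int) (h : maxfold0 l ≠ 0) : maxfold0 l ∈ l := by
  rcases maxfoldA_mem_or l 0 with h1 | h1
  · exact absurd h1 h
  · exact h1

-- IsAns gaps K r: r is the least t ≥ 1 whose total split count is ≤ K
def IsAns (gaps : List Int) (K r : Int) : Prop :=
  1 ≤ r ∧ needSum gaps r ≤ K ∧ ∀ t, 1 ≤ t → t < r → K < needSum gaps t

theorem IsAns_unique (gaps : List Int) (K r r' : Int)
    (h1 : IsAns gaps K r) (h2 : IsAns gaps K r') : r = r' := by
  obtain ⟨ha1, ha2, ha3⟩ := h1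
  obtain ⟨hb1, hb2, hb3⟩ := h2
  rcases lt_trichotomy r r' with h | h | h
  · have := hb3 r ha1 h; omega
  · exact h
  · have := ha3 r' hb1 h; omega

theorem gstep_small (g : List Int) (h : ∀ x ∈ g, x ≤ 1) : gstep g = g ++ [1] := by
  unfold gstep
  split
  · rfl
  · next hne =>
    split
    · rfl
    · next d hd =>
      have hdm : d ∈ g := PySem.List.max?_mem hd
      rw [if_neg (by have := h d hdm; omega)]

theorem iter_small (g : List Int) (h : ∀ x ∈ g, x ≤ 1) :
    ∀ m, iterN m g = g ++ List.replicate m 1 := by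
  intro m
  induction m generalizing g with
  | zero => simp [iterN]
  | succ m ih =>
    show iterN m (gstep g) = g ++ List.replicate (m+1) 1
    rw [gstep_small g h, ih (g ++ [1]) (by
      intro x hx
      rcases List.mem_append.mp hx with h1 | h2
      · exact h x h1
      · simp at h2; omega)]
    rw [List.append_assoc, List.replicate_succ]
    rfl

theorem gstep_bound (g : List Int) (c : Int) (hc : 1 ≤ c) (h : ∀ y ∈ g, y ≤ c) :
    ∀ y ∈ gstep g, y ≤ c := by
  unfold gstep
  split
  · intro y hy
    rcases List.mem_append.mp hy with h1 | h2
    · exact h y h1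
    · simp at h2; omega
  · next hne =>
    split
    · intro y hy
      rcases List.mem_append.mp hy with h1 | h2
      · exact h y h1
      · simp at h2; omega
    · next d hd =>
      have hdc : d ≤ c := h d (PySem.List.max?_mem hd)
      split
      · next hd1 =>
        split
        · exact h
        · next i hi =>
          intro y hy
          have hfd := floordiv_two_bounds d (by omega)
          rcases List.mem_append.mp hy with h1 | h2
          · rcases List.mem_append.mp h1 with h3 | h4
            · exact h y (List.mem_of_mem_take h3)
            · simp at h4
              rcases h4 with h5 | h5 <;> omega
          · exact h y (List.mem_of_mem_drop h2)
      · intro y hy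
        rcases List.mem_append.mp hy with h1 | h2
        · exact h y h1
        · simp at h2; omega

theorem iter_bound (c : Int) (hc : 1 ≤ c) :
    ∀ (m : Nat) (g : List Int), (∀ y ∈ g, y ≤ c) → ∀ y ∈ iterN m g, y ≤ c := by
  intro m
  induction m with
  | zero => intro g h; exact h
  | succ m ih =>
    intro g h
    exact ih (gstep g) (gstep_bound g c hc h)

-- one split round shifts the split-count by exactly one below the split value
theorem needSum_gstep (g : List Int) (d : Int) (hd : PySem.List.max? g (fun x => x) = some d)
    (hd1 : 1 < d) (t : Int) (ht : 1 ≤ t) :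
    needSum (gstep g) t = needSum g t - (if t < d then 1 else 0) := by
  have hne : g ≠ [] := by
    intro h
    rw [h] at hd
    simp [PySem.List.max?] at hd
  have hmax : ∀ y ∈ g, y ≤ d := fun y hy => PySem.List.max?_isMax hd y hy
  have hmem : d ∈ g := PySem.List.max?_mem hd
  obtain ⟨i, hi⟩ : ∃ i, PySem.List.index? g d = some i :=
    Option.isSome_iff_exists.mp ((PySem.List.index?_isSome_iff _ _).mpr hmem)
  obtain ⟨hilt, hgi, -⟩ := PySem.List.getElem_of_index?_eq_some hi
  have hsplice : g = g.take i ++ g[i] :: g.drop (i+1) := by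
    conv_lhs => rw [← List.take_append_drop i g]
    rw [List.drop_eq_getElem_cons hilt]
  have hstep : gstep g
      = g.take i ++ [PySem.Int.floordiv d 2, d - PySem.Int.floordiv d 2] ++ g.drop (i+1) := by
    unfold gstep
    rw [if_neg hne]
    split
    · next heq => rw [hd] at heq; cases heq
    · next d' heq =>
      rw [hd] at heq
      injection heq with heqd
      subst heqd
      rw [if_pos hd1]
      split
      · next heq2 => rw [hi] at heq2; cases heq2
      · next i' heq2 =>
        rw [hi] at heq2
        injection heq2 with heqi
        subst heqi
        rfl
  have hfd := floordiv_two_bounds d (by omega)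
  have hsd : splits d t = (if t < d then 1 else 0)
      + splits (PySem.Int.floordiv d 2) t + splits (d - PySem.Int.floordiv d 2) t := by
    by_cases htd : t < d
    · rw [if_pos htd, splits_eq d t, if_neg (by omega)]
    · have e1 := splits_eq_zero d t (by omega)
      have e2 := splits_eq_zero (PySem.Int.floordiv d 2) t (by omega)
      have e3 := splits_eq_zero (d - PySem.Int.floordiv d 2) t (by omega)
      rw [if_neg htd]
      omega
  calc needSum (gstep g) t
      = needSum (g.take i) t + (splits (PySem.Int.floordiv d 2) t
          + splits (d - PySem.Int.floordiv d 2) t) + needSum (g.drop (i+1)) t := by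
        rw [hstep, needSum_append, needSum_append, needSum_cons, needSum_cons, needSum_nil]
        ring
    _ = needSum g t - (if t < d then 1 else 0) := by
        conv_rhs => rw [hsplice]
        rw [needSum_append, needSum_cons, hgi, hsd]
        ring

-- the K-round greedy result is exactly the least feasible t
theorem greedy (n : Nat) : ∀ gaps : List Int, 1 ≤ n →
    IsAns gaps (n : Int) (maxfold0 (iterN n gaps)) := by
  induction n with
  | zero => intro gaps h; omega
  | succ n ih =>
    intro gaps _
    by_cases hsmall : ∀ x ∈ gaps, x ≤ 1
    · -- every gap ≤ 1: each round appends a unit gap; the answer is 1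
      rw [iter_small gaps hsmall (n+1)]
      have hone : maxfold0 (gaps ++ List.replicate (n+1) 1) = 1 := by
        have hge : (1 : Int) ≤ maxfold0 (gaps ++ List.replicate (n+1) 1) := by
          refine le_maxfold0 _ 1 ?_
          refine List.mem_append.mpr (Or.inr ?_)
          simp
        have hle : maxfold0 (gaps ++ List.replicate (n+1) 1) ≤ 1 := by
          refine maxfold0_le _ 1 (by omega) ?_
          intro x hx
          rcases List.mem_append.mp hx with h1 | h2
          · exact hsmall x h1
          · simp at h2; omega
        omega
      rw [hone]
      refine ⟨le_refl 1, ?_, ?_⟩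
      · rw [needSum_zero_of_all_le gaps 1 hsmall]
        push_cast
        omega
      · intro t ht1 ht2
        omega
    · -- some gap exceeds 1: this round splits the maximal gap d
      push_neg at hsmall
      obtain ⟨x, hxm, hx1⟩ := hsmall
      have hne : gaps ≠ [] := by
        intro h
        rw [h] at hxm
        simp at hxm
      obtain ⟨d, hd⟩ : ∃ d, PySem.List.max? gaps (fun x => x) = some d := by
        cases h : PySem.List.max? gaps (fun x => x) with
        | none => exact absurd ((PySem.List.max?_eq_none_iff _ _).mp h) hne
        | some d => exact ⟨d, rfl⟩
      have hmax : ∀ y ∈ gaps, y ≤ d := fun y hy => PySem.List.max?_isMax hd y hy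
      have hd1 : 1 < d := lt_of_lt_of_le hx1 (hmax x hxm)
      have hrel := needSum_gstep gaps d hd hd1
      have hgb : ∀ y ∈ gstep gaps, y ≤ d := gstep_bound gaps d (by omega) hmax
      have hfd := floordiv_two_bounds d (by omega)
      have hfdmem : PySem.Int.floordiv d 2 ∈ gstep gaps := by
        unfold gstep
        rw [if_neg hne]
        split
        · next heq => rw [hd] at heq; cases heq
        · next d' heq =>
          rw [hd] at heq
          injection heq with heqd
          subst heqd
          rw [if_pos hd1]
          split
          · next heq2 =>
            exact absurd (PySem.List.max?_mem hd) ((PySem.List.index?_eq_none_iff _ _).mp heq2)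
          · next i heq2 =>
            refine List.mem_append.mpr (Or.inl (List.mem_append.mpr (Or.inr ?_)))
            simp
      cases n with
      | zero =>
        -- exactly one round: the result is the max after one split
        show IsAns gaps ((1 : Nat) : Int) (maxfold0 (iterN 0 (gstep gaps)))
        show IsAns gaps ((1 : Nat) : Int) (maxfold0 (gstep gaps))
        have hr1 : 1 ≤ maxfold0 (gstep gaps) := le_trans hfd.1 (le_maxfold0 _ _ hfdmem)
        have hrd : maxfold0 (gstep gaps) ≤ d := maxfold0_le _ d (by omega) hgb
        refine ⟨hr1, ?_, ?_⟩
        · by_cases hcase : maxfold0 (gstep gaps) < d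
          · have := hrel (maxfold0 (gstep gaps)) hr1
            rw [if_pos hcase] at this
            have hz : needSum (gstep gaps) (maxfold0 (gstep gaps)) = 0 :=
              needSum_zero_of_all_le _ _ (fun y hy => le_maxfold0 _ y hy)
            push_cast
            omega
          · have hz : needSum gaps (maxfold0 (gstep gaps)) = 0 :=
              needSum_zero_of_all_le _ _ (fun y hy => by have := hmax y hy; omega)
            push_cast
            omega
        · intro t ht1 ht2
          have htd : t < d := by omega
          have := hrel t ht1
          rw [if_pos htd] at this
          have hp : 1 ≤ needSum (gstep gaps) t := by
            refine needSum_pos _ t (maxfold0 (gstep gaps)) ?_ ht1 ht2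
            exact maxfold0_mem _ (by omega)
          push_cast
          omega
      | succ m =>
        -- n = m+1 ≥ 1 rounds remain after this one: use the IH on the stepped list
        have hIH := ih (gstep gaps) (by omega)
        obtain ⟨hr1, hr2, hr3⟩ := hIH
        show IsAns gaps ((m + 2 : Nat) : Int) (maxfold0 (iterN (m+1) (gstep gaps)))
        have hrd : maxfold0 (iterN (m+1) (gstep gaps)) ≤ d := by
          refine maxfold0_le _ d (by omega) ?_
          exact iter_bound d (by omega) (m+1) (gstep gaps) hgb
        refine ⟨hr1, ?_, ?_⟩
        · by_cases hcase : maxfold0 (iterN (m+1) (gstep gaps)) < d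
          · have := hrel (maxfold0 (iterN (m+1) (gstep gaps))) hr1
            rw [if_pos hcase] at this
            push_cast at hr2 ⊢
            omega
          · have hz : needSum gaps (maxfold0 (iterN (m+1) (gstep gaps))) = 0 :=
              needSum_zero_of_all_le _ _ (fun y hy => by have := hmax y hy; omega)
            push_cast
            omega
        · intro t ht1 ht2
          have htd : t < d := by omega
          have := hrel t ht1
          rw [if_pos htd] at this
          have := hr3 t ht1 ht2
          push_cast at this ⊢
          omega

-- the binary search returns the least feasible t
theorem bsearchF_correct : ∀ (f : Nat) (gaps : List Int) (K lo hi : Int),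
    (hi - lo).toNat < f → 1 ≤ lo → lo ≤ hi → needSum gaps hi ≤ K →
    (∀ t, 1 ≤ t → t < lo → K < needSum gaps t) →
    IsAns gaps K (bsearchF f gaps K lo hi) := by
  intro f
  induction f with
  | zero => intro gaps K lo hi hf _ _ _ _; omega
  | succ f ih =>
    intro gaps K lo hi hf h1 h2 h3 h4
    have he : PySem.Int.floordiv (lo + hi) 2 = (lo + hi) / 2 :=
      PySem.Int.floordiv_eq_ediv_of_pos (by omega : (0:Int) < 2)
    show IsAns gaps K
      (if lo < hi then
        if needSum gaps (PySem.Int.floordiv (lo + hi) 2) ≤ K then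
          bsearchF f gaps K lo (PySem.Int.floordiv (lo + hi) 2)
        else
          bsearchF f gaps K (PySem.Int.floordiv (lo + hi) 2 + 1) hi
      else lo)
    by_cases hlt : lo < hi
    · rw [if_pos hlt]
      by_cases hle : needSum gaps (PySem.Int.floordiv (lo + hi) 2) ≤ K
      · rw [if_pos hle]
        exact ih gaps K lo (PySem.Int.floordiv (lo + hi) 2)
          (by rw [he]; omega) h1 (by rw [he]; omega) hle h4
      · rw [if_neg hle]
        refine ih gaps K (PySem.Int.floordiv (lo + hi) 2 + 1) hi
          (by rw [he]; omega) (by rw [he]; omega) (by rw [he]; omega) h3 ?_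
        intro t ht1 ht2
        by_cases hcase : t < lo
        · exact h4 t ht1 hcase
        · have hmono : needSum gaps (PySem.Int.floordiv (lo + hi) 2) ≤ needSum gaps t :=
            needSum_anti gaps t _ ht1 (by omega)
          omega
    · rw [if_neg hlt]
      have heq : lo = hi := by omega
      exact ⟨h1, by rw [heq]; exact h3, h4⟩

theorem bsearch_correct (gaps : List Int) (K lo hi : Int) (h1 : 1 ≤ lo) (h2 : lo ≤ hi)
    (h3 : needSum gaps hi ≤ K) (h4 : ∀ t, 1 ≤ t → t < lo → K < needSum gaps t) :
    IsAns gaps K (bsearch gaps K lo hi) :=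
  bsearchF_correct ((hi - lo).toNat + 1) gaps K lo hi (by omega) h1 h2 h3 h4

-- A's loop over pyRange 0 K 1 is iterN K.toNat on the gap list
theorem foldl_const_gstep (L : List Int) : ∀ g0 : List Int,
    L.foldl (fun g _ => gstep g) g0 = iterN L.length g0 := by
  induction L with
  | nil => intro g0; rfl
  | cons x L ih => intro g0; exact ih (gstep g0)

-- B's value, for K ≥ 1, satisfies IsAns (hi0 stands for Source B's `max(gaps) if gaps else 1`)
theorem alt_isans (gaps : List Int) (K hi0 : Int) (hK : 1 ≤ K)
    (hall : ∀ g ∈ gaps, g ≤ hi0) :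
    IsAns gaps K (bsearch gaps K 1 (if hi0 < 1 then 1 else hi0)) := by
  have hz : needSum gaps (if hi0 < 1 then 1 else hi0) = 0 := by
    refine needSum_zero_of_all_le _ _ ?_
    intro g hg
    have := hall g hg
    split_ifs <;> omega
  refine bsearch_correct gaps K 1 (if hi0 < 1 then 1 else hi0) (le_refl 1)
    (by split_ifs <;> omega) (by omega) ?_
  intro t ht1 ht2
  omega

theorem IsAns_nil (K r : Int) (hK : 0 ≤ K) (h : IsAns [] K r) : r = 1 := by
  obtain ⟨h1, h2, h3⟩ := h
  by_contra hne
  have h4 := h3 1 (le_refl 1) (by omega)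
  rw [needSum_nil] at h4
  omega

-- ===== VERDICT (by name: the statement is the Claim_ definition above) =====
theorem Solve_spec : Claim_equal_Solve := by
  intro N K M _ hpre
  unfold Spec_Solve Solve Solve_alt
  simp only [alt_gaps]
  by_cases hspec : K = 1 ∧ M.length = 1
  · rw [if_pos hspec]
    obtain ⟨hK, hlen⟩ := hspec
    subst hK
    match M, hlen with
    | [m], _ =>
      rw [if_neg (by omega : ¬ (1 : Int) < 1)]
      rw [show gapsOf [m] = [] from rfl]
      rw [show (PySem.List.pyGetD [m] 0 0 + 1) - PySem.List.pyGetD [m] 0 0 = 1 by ring]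
      exact (IsAns_nil 1 _ (by omega)
        (alt_isans [] 1 1 (le_refl 1) (by intro g hg; simp at hg))).symm
  · rw [if_neg hspec]
    by_cases hK : K < 1
    · rw [if_pos hK, PySem.List.pyRange_one_eq_nil (by omega), List.foldl_nil]
      exact final_bridge M 0
    · rw [if_neg hK]
      have hK1 : 1 ≤ K := by omega
      have hMne : M ≠ [] := by
        rcases hpre with h | h
        · exact h
        · omega
      obtain ⟨h2, hne, hg⟩ := loop_bridge (PySem.List.pyRange 0 K 1) M hMne
      rw [h2, final_bridge, hg, foldl_const_gstep]
      have hlen : (PySem.List.pyRange 0 K 1).length = K.toNat := by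
        rw [PySem.List.length_pyRange_one]
        omega
      rw [hlen]
      have hA := greedy K.toNat (gapsOf M) (by omega)
      rw [show ((K.toNat : Nat) : Int) = K by omega] at hA
      refine IsAns_unique (gapsOf M) K _ _ hA (alt_isans (gapsOf M) K _ hK1 ?_)
      intro g hg
      cases h : PySem.List.max? (gapsOf M) (fun x => x) with
      | none =>
        rw [(PySem.List.max?_eq_none_iff _ _).mp h] at hg
        simp at hg
      | some d =>
        exact PySem.List.max?_isMax h g hg
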